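-- pv_equiv track=rewrite | github.com/24doeway/advent_2020 | day7.py | contains_colour
-- ===== SOURCE A (Python) =====
-- def contains_colour(check_list, colour_list):
--     ret = {}
--     for c in colour_list:
--         ret[c] = 1
--         for k, v in check_list.items():
--             if c in v:
--                 ret[k] = 1
--     return ret.keys()
-- ===== SOURCE B (Python) =====
-- def contains_colour(check_list, colour_list):
--     containers = {}
--     for k, v in check_list.items():
--         for c in v:
--             containers.setdefault(c, []).append(k)
--     out = []
--     for c in colour_list:
--         out.append(c)
--         out.extend(containers.get(c, []))
--     return dict.fromkeys(out).keys()
-- ===== Notes on version B (the rewrite author's own statement) =====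
-- stated objective: faster
-- what changed: B precomputes once an inverse index colour -> list of bags whose contents mention it, then answers each colour by a single dict lookup instead of rescanning all of check_list per colour.
import Mathlib
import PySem

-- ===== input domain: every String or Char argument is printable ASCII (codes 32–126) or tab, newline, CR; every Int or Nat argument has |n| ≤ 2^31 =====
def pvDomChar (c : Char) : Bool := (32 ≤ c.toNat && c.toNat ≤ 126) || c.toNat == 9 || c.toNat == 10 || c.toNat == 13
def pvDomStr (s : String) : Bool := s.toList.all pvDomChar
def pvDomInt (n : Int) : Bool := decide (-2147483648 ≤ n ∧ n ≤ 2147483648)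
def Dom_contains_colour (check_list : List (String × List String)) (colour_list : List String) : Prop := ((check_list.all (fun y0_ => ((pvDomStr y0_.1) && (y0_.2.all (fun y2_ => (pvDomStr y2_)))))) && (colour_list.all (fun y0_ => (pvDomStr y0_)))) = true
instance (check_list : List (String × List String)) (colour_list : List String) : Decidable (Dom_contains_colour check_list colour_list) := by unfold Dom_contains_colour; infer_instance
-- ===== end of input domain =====

-- B replaces A's per-colour rescan of check_list by one precomputed inverse index colour -> containing bags (objective: faster).
-- check_list is a Python dict, decoded from the association list with PySem.Dict.ofList in both ports.

-- ===== PORT A =====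
def contains_colour (check_list : List (String × List String)) (colour_list : List String) : List String :=
  (colour_list.foldl (fun ret c =>
      (PySem.Dict.ofList check_list).items.foldl
        (fun ret kv => if kv.2.contains c then ret.insert kv.1 (1 : Int) else ret)
        (ret.insert c (1 : Int)))
    PySem.Dict.empty).keys

-- ===== PORT B =====
def contains_colour_alt (check_list : List (String × List String)) (colour_list : List String) : List String :=
  let containers : PySem.Dict String (List String) :=
    (PySem.Dict.ofList check_list).items.foldl
      (fun d kv => kv.2.foldl (fun d x => d.modify x [] (fun l => l ++ [kv.1])) d)
      PySem.Dict.empty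
  PySem.List.dedup
    (colour_list.foldl (fun out c => out ++ c :: containers.getD c []) [])

-- ===== PRECONDITION & SPEC =====
def Spec_contains_colour (check_list : List (String × List String)) (colour_list : List String) (out : List String) : Prop := out = contains_colour_alt check_list colour_list
instance (check_list : List (String × List String)) (colour_list : List String) (out : List String) : Decidable (Spec_contains_colour check_list colour_list out) := by unfold Spec_contains_colour; infer_instance

-- ===== CLAIM (what is proved, stated in full; the proofs are below) =====
def Claim_equal_contains_colour : Prop := ∀ (check_list : List (String × List String)) (colour_list : List String), Dom_contains_colour check_list colour_list → Spec_contains_colour check_list colour_list (contains_colour check_list colour_list)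

-- ===== LEMMAS AND PROOFS =====

-- inserting the constant value 1 at the same key repeatedly collapses to one insert (or none if the list is empty)
lemma foldl_insert_const {d : PySem.Dict String Int} {k : String} {l : List String} :
    l.foldl (fun d _ => d.insert k (1 : Int)) d = if l = [] then d else d.insert k 1 := by
  induction l generalizing d with
  | nil => rfl
  | cons x xs ih =>
      simp only [List.foldl_cons, ih, PySem.Dict.insert_insert_self]
      split <;> simp_all

-- the inverse-index lookup: containers.getD c [] lists, per entry kv with c ∈ kv.2, kv.1 once per occurrence
lemma containers_getD (items : List (String × List String)) (c : String)
    (d : PySem.Dict String (List String)) :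
    (items.foldl (fun d kv => kv.2.foldl (fun d x => d.modify x [] (fun l => l ++ [kv.1])) d) d).getD c []
      = d.getD c [] ++ items.flatMap (fun kv => (kv.2.filter (· == c)).map (fun _ => kv.1)) := by
  induction items generalizing d with
  | nil => simp
  | cons kv rest ih =>
      simp only [List.foldl_cons, List.flatMap_cons, ih]
      have h : kv.2.foldl (fun d x => d.modify x [] (fun l => l ++ [kv.1])) d
          = (kv.2.map (fun x => (x, kv.1))).foldl (fun d p => d.modify p.1 [] (fun l => l ++ [p.2])) d := by
        rw [List.foldl_map]
      rw [h, PySem.Dict.getD_foldl_modify_append, List.filter_map, List.map_map, List.append_assoc]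
      rfl

-- A's per-colour scan equals a flat sequence of constant inserts over the inverse-index entry
lemma per_colour (items : List (String × List String)) (c : String) (d : PySem.Dict String Int) :
    items.foldl (fun ret kv => if kv.2.contains c then ret.insert kv.1 (1 : Int) else ret) d
      = (items.flatMap (fun kv => (kv.2.filter (· == c)).map (fun _ => kv.1))).foldl
          (fun ret k => ret.insert k (1 : Int)) d := by
  induction items generalizing d with
  | nil => rfl
  | cons kv rest ih =>
      simp only [List.foldl_cons, List.flatMap_cons, List.foldl_append, List.foldl_map]
      rw [foldl_insert_const]
      by_cases hc : c ∈ kv.2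
      · have h1 : kv.2.contains c = true := by simpa using hc
        have h2 : kv.2.filter (· == c) ≠ [] := by
          intro h
          rw [List.filter_eq_nil_iff] at h
          have := h c hc
          simp at this
        rw [if_pos h1, if_neg h2]
        exact ih _
      · have h1 : ¬ kv.2.contains c = true := by simpa using hc
        have h2 : kv.2.filter (· == c) = [] := by
          rw [List.filter_eq_nil_iff]
          intro x hx hxc
          exact hc ((beq_iff_eq.mp hxc) ▸ hx)
        rw [if_neg h1, if_pos h2]
        exact ih _

-- A's whole double loop is one flat sequence of constant inserts
lemma a_flat (items : List (String × List String)) (colour_list : List String)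
    (d : PySem.Dict String Int) :
    colour_list.foldl (fun ret c =>
        items.foldl (fun ret kv => if kv.2.contains c then ret.insert kv.1 (1 : Int) else ret)
          (ret.insert c (1 : Int))) d
      = (colour_list.flatMap (fun c =>
            c :: items.flatMap (fun kv => (kv.2.filter (· == c)).map (fun _ => kv.1)))).foldl
          (fun ret k => ret.insert k (1 : Int)) d := by
  induction colour_list generalizing d with
  | nil => rfl
  | cons c rest ih =>
      simp only [List.foldl_cons, List.flatMap_cons, List.foldl_append]
      rw [per_colour, ih]

-- ===== VERDICT (by name: the statement is the Claim_ definition above) =====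
theorem contains_colour_spec : Claim_equal_contains_colour := by
  intro check_list colour_list _
  unfold Spec_contains_colour contains_colour contains_colour_alt
  simp only []
  rw [a_flat, PySem.Dict.keys_foldl_insert, PySem.Dict.keys_empty,
      PySem.Set.update_nil_left, ← PySem.List.dedup_eq_ofList,
      PySem.List.foldl_append_eq_flatMap, List.nil_append]
  congr 1
  congr 1
  funext c
  rw [containers_getD]
  simp [PySem.Dict.getD_empty]
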